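-- pv_equiv track=rewrite | github.com/world-DESIGNER/TFC_Calculator | TFC_Calculator.py | recommend_additional_pieces
-- ===== SOURCE A (Python) =====
-- def recommend_additional_pieces(rich, normal, poor, small):
--     best_combo = None
--     min_pieces_needed = float('inf')
--
--     for r in range(25):
--         for n in range(25):
--             for p in range(25):
--                 for s in range(25):
--                     total_volume = (rich + r)*35 + (normal + n)*25 + (poor + p)*15 + (small + s)*10
--                     total_pieces = r + n + p + s
--
--                     if total_volume % 100 == 0 and total_volume != 0 and total_pieces <= 24 and total_pieces < min_pieces_needed:
--                         best_combo = (r, n, p, s)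
--                         min_pieces_needed = total_pieces
--
--     return best_combo
-- ===== SOURCE B (Python) =====
-- def recommend_additional_pieces(rich, normal, poor, small):
--     # Search by increasing total added pieces m; within each m, compositions
--     # (r, n, p, s) in lexicographic order; return the first valid combo.
--     for m in range(25):
--         for r in range(m + 1):
--             for n in range(m - r + 1):
--                 for p in range(m - r - n + 1):
--                     s = m - r - n - p
--                     total_volume = (rich + r)*35 + (normal + n)*25 + (poor + p)*15 + (small + s)*10
--                     if total_volume % 100 == 0 and total_volume != 0:
--                         return (r, n, p, s)
--     return None
-- ===== Notes on version B (the rewrite author's own statement) =====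
-- stated objective: faster
-- what changed: Replaces A's exhaustive 25^4 scan with a running minimum by a best-first search over increasing total added pieces m, enumerating only the compositions r+n+p+s=m in lexicographic order and returning the first valid combo, so the minimum is found without examining the whole grid.
import Mathlib
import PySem

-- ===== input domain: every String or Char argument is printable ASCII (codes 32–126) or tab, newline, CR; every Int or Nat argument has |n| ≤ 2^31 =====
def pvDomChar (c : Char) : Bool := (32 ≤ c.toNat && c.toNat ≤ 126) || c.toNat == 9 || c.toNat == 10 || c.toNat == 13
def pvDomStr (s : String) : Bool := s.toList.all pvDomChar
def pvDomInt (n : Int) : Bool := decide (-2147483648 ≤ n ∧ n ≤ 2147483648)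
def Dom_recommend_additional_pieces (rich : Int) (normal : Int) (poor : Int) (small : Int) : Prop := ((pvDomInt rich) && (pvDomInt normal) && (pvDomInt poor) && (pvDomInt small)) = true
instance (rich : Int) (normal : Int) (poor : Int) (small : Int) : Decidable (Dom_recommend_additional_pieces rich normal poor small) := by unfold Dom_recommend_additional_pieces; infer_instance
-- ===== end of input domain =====

-- B replaces A's exhaustive 25^4 running-minimum scan by a best-first search over increasing
-- total added pieces m (compositions of m in lexicographic order, first valid combo wins);
-- a timing run measured B faster by a large constant factor.

-- ===== PORT A =====
-- min_pieces_needed = float('inf') is modelled as `none` in the Option Int component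
-- (`match st.2 with | none => true` is Python's `total_pieces < inf`).
def recommend_additional_pieces (rich : Int) (normal : Int) (poor : Int) (small : Int) : Option (Int × Int × Int × Int) :=
  ((PySem.List.pyRange 0 25 1).foldl (fun st r =>
    (PySem.List.pyRange 0 25 1).foldl (fun st n =>
      (PySem.List.pyRange 0 25 1).foldl (fun st p =>
        (PySem.List.pyRange 0 25 1).foldl (fun st s =>
          let total_volume := (rich + r)*35 + (normal + n)*25 + (poor + p)*15 + (small + s)*10
          let total_pieces := r + n + p + s
          if PySem.Int.mod total_volume 100 == 0 && total_volume != 0 && decide (total_pieces ≤ 24) &&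
             (match st.2 with | none => true | some mp => decide (total_pieces < mp))
          then (some (r, n, p, s), some total_pieces) else st) st) st) st)
    ((none : Option (Int × Int × Int × Int)), (none : Option Int))).1

-- ===== PORT B =====
-- early `return` inside the nested for-loops is ported as nested findSome?
def recommend_additional_pieces_alt (rich : Int) (normal : Int) (poor : Int) (small : Int) : Option (Int × Int × Int × Int) :=
  (PySem.List.pyRange 0 25 1).findSome? (fun m =>
    (PySem.List.pyRange 0 (m + 1) 1).findSome? (fun r =>
      (PySem.List.pyRange 0 (m - r + 1) 1).findSome? (fun n =>
        (PySem.List.pyRange 0 (m - r - n + 1) 1).findSome? (fun p =>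
          let s := m - r - n - p
          let total_volume := (rich + r)*35 + (normal + n)*25 + (poor + p)*15 + (small + s)*10
          if PySem.Int.mod total_volume 100 == 0 && total_volume != 0
          then some (r, n, p, s) else none))))

-- ===== PRECONDITION & SPEC =====
def Spec_recommend_additional_pieces (rich : Int) (normal : Int) (poor : Int) (small : Int) (out : Option (Int × Int × Int × Int)) : Prop := out = recommend_additional_pieces_alt rich normal poor small
instance (rich : Int) (normal : Int) (poor : Int) (small : Int) (out : Option (Int × Int × Int × Int)) : Decidable (Spec_recommend_additional_pieces rich normal poor small out) := by unfold Spec_recommend_additional_pieces; infer_instance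

-- ===== CLAIM (what is proved, stated in full; the proofs are below) =====
def Claim_equal_recommend_additional_pieces : Prop := ∀ (rich : Int) (normal : Int) (poor : Int) (small : Int), Dom_recommend_additional_pieces rich normal poor small → Spec_recommend_additional_pieces rich normal poor small (recommend_additional_pieces rich normal poor small)

-- ===== LEMMAS AND PROOFS =====

-- weight (total added pieces) of a combo
def pvW (t : Int × Int × Int × Int) : Int := t.1 + t.2.1 + t.2.2.1 + t.2.2.2

-- validity of a combo (divisible total volume, nonzero)
def pvQ (rich normal poor small : Int) (t : Int × Int × Int × Int) : Bool :=
  PySem.Int.mod ((rich + t.1)*35 + (normal + t.2.1)*25 + (poor + t.2.2.1)*15 + (small + t.2.2.2)*10) 100 == 0 &&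
  ((rich + t.1)*35 + (normal + t.2.1)*25 + (poor + t.2.2.1)*15 + (small + t.2.2.2)*10) != 0

-- A's traversal order: all combos in lexicographic order
def pvLex : List (Int × Int × Int × Int) :=
  (PySem.List.pyRange 0 25 1).flatMap (fun r =>
    (PySem.List.pyRange 0 25 1).flatMap (fun n =>
      (PySem.List.pyRange 0 25 1).flatMap (fun p =>
        (PySem.List.pyRange 0 25 1).map (fun s => (r, n, p, s)))))

-- A's loop body, abstracted over the validity predicate
def pvStep (q : Int × Int × Int × Int → Bool)
    (st : Option (Int × Int × Int × Int) × Option Int) (t : Int × Int × Int × Int) :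
    Option (Int × Int × Int × Int) × Option Int :=
  if q t && decide (pvW t ≤ 24) && (match st.2 with | none => true | some mp => decide (pvW t < mp))
  then (some t, some (pvW t)) else st

-- first element of L with weight m that is valid
def pvSlot (q : Int × Int × Int × Int → Bool) (L : List (Int × Int × Int × Int)) (m : Int) :
    Option (Int × Int × Int × Int) :=
  L.find? (fun t => (pvW t == m) && q t)

-- first valid element of L in (weight, position) order
def pvR (q : Int × Int × Int × Int → Bool) (L : List (Int × Int × Int × Int)) :
    Option (Int × Int × Int × Int) :=
  (PySem.List.pyRange 0 25 1).findSome? (pvSlot q L)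

theorem pv_findSome?_congr {α β : Type} (f g : α → Option β) :
    ∀ l : List α, (∀ x ∈ l, f x = g x) → l.findSome? f = l.findSome? g := by
  intro l
  induction l with
  | nil => intro _; rfl
  | cons a t ih =>
    intro h
    simp only [List.findSome?_cons]
    rw [h a (by simp)]
    cases g a with
    | none => exact ih (fun x hx => h x (by simp [hx]))
    | some v => rfl

theorem pv_find?_congr {α : Type} (p q : α → Bool) :
    ∀ l : List α, (∀ x ∈ l, p x = q x) → l.find? p = l.find? q := by
  intro l
  induction l with
  | nil => intro _; rfl
  | cons a t ih =>
    intro h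
    simp only [List.find?_cons]
    rw [h a (by simp)]
    cases q a with
    | false => exact ih (fun x hx => h x (by simp [hx]))
    | true => rfl

theorem pv_find?_flatMap {α β : Type} (g : α → List β) (p : β → Bool) :
    ∀ l : List α, (l.flatMap g).find? p = l.findSome? (fun a => (g a).find? p) := by
  intro l
  induction l with
  | nil => rfl
  | cons a t ih =>
    simp only [List.flatMap_cons, List.find?_append, List.findSome?_cons]
    cases h : (g a).find? p with
    | none => simpa [h] using ih
    | some v => simp [h]

theorem pv_findSome?_first {β : Type} (f : Int → Option β) (c : Int) (v : β) :
    ∀ l : List Int, l.Pairwise (· < ·) → c ∈ l → f c = some v →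
      (∀ m ∈ l, m < c → f m = none) → l.findSome? f = some v := by
  intro l
  induction l with
  | nil => intro _ hc; simp at hc
  | cons a t ih =>
    intro hp hc hfc hn
    rcases List.mem_cons.mp hc with hac | hct
    · subst hac; simp [List.findSome?_cons, hfc]
    · have hat : a < c := (List.pairwise_cons.mp hp).1 c hct
      have ha : f a = none := hn a (by simp) hat
      simp only [List.findSome?_cons, ha]
      exact ih (List.pairwise_cons.mp hp).2 hct hfc (fun m hm hmc => hn m (by simp [hm]) hmc)

theorem pv_findSome?_char {β : Type} (f : Int → Option β) (v : β) :
    ∀ l : List Int, l.Pairwise (· < ·) → l.findSome? f = some v →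
      ∃ c ∈ l, f c = some v ∧ ∀ m ∈ l, m < c → f m = none := by
  intro l
  induction l with
  | nil => intro _ h; simp at h
  | cons a t ih =>
    intro hp h
    cases hfa : f a with
    | some u =>
      refine ⟨a, by simp, ?_, ?_⟩
      · simp [List.findSome?_cons, hfa] at h; rw [hfa, h]
      · intro m hm hma
        rcases List.mem_cons.mp hm with h1 | h2
        · omega
        · have := (List.pairwise_cons.mp hp).1 m h2; omega
    | none =>
      simp only [List.findSome?_cons, hfa] at h
      obtain ⟨c, hc, hfc, hmin⟩ := ih (List.pairwise_cons.mp hp).2 h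
      refine ⟨c, by simp [hc], hfc, ?_⟩
      intro m hm hmc
      rcases List.mem_cons.mp hm with h1 | h2
      · subst h1; exact hfa
      · exact hmin m h2 hmc

theorem pv_find?_key (h : Int → Bool) (c : Int) :
    ∀ l : List Int, l.Nodup →
      l.find? (fun s => (s == c) && h s) = if c ∈ l ∧ h c = true then some c else none := by
  intro l
  induction l with
  | nil => intro _; simp
  | cons a t ih =>
    intro hnd
    obtain ⟨hna, hnt⟩ := List.nodup_cons.mp hnd
    by_cases hac : a = c
    · subst hac
      simp only [List.find?_cons, beq_self_eq_true, Bool.true_and]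
      cases hha : h a with
      | true => simp [hha]
      | false =>
        have : t.find? (fun s => (s == a) && h s) = none := by
          apply List.find?_eq_none.mpr
          intro s hs
          have : (s == a) = false := by simp; intro he; subst he; exact absurd hs hna
          simp [this]
        simp [this, hha]
    · have : ((a == c) && h a) = false := by simp [hac]
      simp only [List.find?_cons, this]
      rw [ih hnt]
      have : (c ∈ a :: t ∧ h c = true) ↔ (c ∈ t ∧ h c = true) := by
        constructor
        · rintro ⟨hm, hh⟩
          rcases List.mem_cons.mp hm with h1 | h2
          · exact absurd h1.symm hac
          · exact ⟨h2, hh⟩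
        · rintro ⟨hm, hh⟩; exact ⟨by simp [hm], hh⟩
      simp only [this]

theorem pv_trunc {β : Type} (f : Int → Option β) (k b : Int) (h0 : 0 ≤ k) (hk : k ≤ b)
    (hnone : ∀ x, k ≤ x → x < b → f x = none) :
    (PySem.List.pyRange 0 b 1).findSome? f = (PySem.List.pyRange 0 k 1).findSome? f := by
  rw [PySem.List.pyRange_one_append 0 k b h0 hk, List.findSome?_append]
  have : (PySem.List.pyRange k b 1).findSome? f = none := by
    apply List.findSome?_eq_none_iff.mpr
    intro x hx
    obtain ⟨h1, h2⟩ := PySem.List.mem_pyRange_one.mp hx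
    exact hnone x h1 h2
  rw [this]
  cases (PySem.List.pyRange 0 k 1).findSome? f <;> rfl

theorem pv_fold_eq_R (q : Int × Int × Int × Int → Bool) :
    ∀ L : List (Int × Int × Int × Int), (∀ t ∈ L, 0 ≤ pvW t) →
      L.foldl (pvStep q) (none, none) = (pvR q L, (pvR q L).map pvW) := by
  intro L
  induction L using List.reverseRecOn with
  | nil =>
    intro _
    have h : pvR q [] = none := List.findSome?_eq_none_iff.mpr (fun x _ => rfl)
    rw [h]; rfl
  | append_singleton L a ih =>
    intro hw
    have hwL : ∀ t ∈ L, 0 ≤ pvW t := fun t ht => hw t (by simp [ht])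
    have hwa : 0 ≤ pvW a := hw a (by simp)
    rw [List.foldl_append, ih hwL]
    simp only [List.foldl_cons, List.foldl_nil]
    have hslot : ∀ m, pvSlot q (L ++ [a]) m =
        (pvSlot q L m).or (if (pvW a == m) && q a then some a else none) := by
      intro m
      simp only [pvSlot, List.find?_append]
      congr 1
      cases hpa : ((pvW a == m) && q a) <;> simp [List.find?_cons, hpa]
    cases hR : pvR q L with
    | none =>
      have hnone : ∀ m ∈ PySem.List.pyRange 0 25 1, pvSlot q L m = none :=
        List.findSome?_eq_none_iff.mp hR
      have hR' : pvR q (L ++ [a]) =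
          (PySem.List.pyRange 0 25 1).findSome? (fun m => if (pvW a == m) && q a then some a else none) := by
        apply pv_findSome?_congr
        intro m hm
        rw [hslot, hnone m hm, Option.none_or]
      by_cases hq : q a = true
      · by_cases hle : pvW a ≤ 24
        · have hmem : pvW a ∈ PySem.List.pyRange 0 25 1 :=
            PySem.List.mem_pyRange_one.mpr ⟨hwa, by omega⟩
          have hsome : pvR q (L ++ [a]) = some a := by
            rw [hR']
            apply pv_findSome?_first _ (pvW a) a _ (PySem.List.pairwise_lt_pyRange_one 0 25) hmem
            · simp [hq]
            · intro m _ hlt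
              have : (pvW a == m) = false := by simp; omega
              simp [this]
          rw [hsome]
          simp [pvStep, hq, hle]
        · have hnone' : pvR q (L ++ [a]) = none := by
            rw [hR']
            apply List.findSome?_eq_none_iff.mpr
            intro m hm
            obtain ⟨_, h2⟩ := PySem.List.mem_pyRange_one.mp hm
            have : (pvW a == m) = false := by simp; omega
            simp [this]
          rw [hnone']
          simp [pvStep, hq, hle]
      · have hq' : q a = false := by simpa using hq
        have hnone' : pvR q (L ++ [a]) = none := by
          rw [hR']
          apply List.findSome?_eq_none_iff.mpr
          intro m _
          simp [hq']
        rw [hnone']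
        simp [pvStep, hq']
    | some b =>
      obtain ⟨c, hcmem, hslotc, hmin⟩ :=
        pv_findSome?_char (pvSlot q L) b _ (PySem.List.pairwise_lt_pyRange_one 0 25) hR
      have hcb := List.find?_some hslotc
      have hqb : q b = true := by simp at hcb; exact hcb.2
      have hwb : pvW b = c := by simp at hcb; exact hcb.1
      obtain ⟨hc0, hc25⟩ := PySem.List.mem_pyRange_one.mp hcmem
      subst hwb
      by_cases hcond : q a = true ∧ pvW a < pvW b
      · have hmem : pvW a ∈ PySem.List.pyRange 0 25 1 :=
          PySem.List.mem_pyRange_one.mpr ⟨hwa, by omega⟩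
        have hsome : pvR q (L ++ [a]) = some a := by
          apply pv_findSome?_first _ (pvW a) a _ (PySem.List.pairwise_lt_pyRange_one 0 25) hmem
          · rw [hslot, hmin (pvW a) hmem (by omega), Option.none_or]
            simp [hcond.1]
          · intro m hm hlt
            rw [hslot, hmin m hm (by omega), Option.none_or]
            have : (pvW a == m) = false := by simp; omega
            simp [this]
        rw [hsome]
        simp [pvStep, hcond.1, hcond.2, (by omega : pvW a ≤ 24)]
      · have hsome : pvR q (L ++ [a]) = some b := by
          apply pv_findSome?_first _ (pvW b) b _ (PySem.List.pairwise_lt_pyRange_one 0 25) hcmem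
          · rw [hslot, hslotc]; rfl
          · intro m hm hlt
            rw [hslot, hmin m hm hlt, Option.none_or]
            by_cases hqa : q a = true
            · have : (pvW a == m) = false := by
                simp
                intro he
                exact absurd ⟨hqa, by omega⟩ hcond
              simp [this]
            · have : q a = false := by simpa using hqa
              simp [this]
        rw [hsome]
        have hfalse : (q a && decide (pvW a ≤ 24) &&
            (match (some (pvW b) : Option Int) with | none => true | some mp => decide (pvW a < mp))) = false := by
          by_cases hqa : q a = true
          · have : ¬ (pvW a < pvW b) := fun hl => hcond ⟨hqa, hl⟩
            simp [this]
          · have : q a = false := by simpa using hqa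
            simp [this]
        simp only [pvStep, Option.map_some]
        rw [hfalse]
        simp

theorem pv_A_eq (rich normal poor small : Int) :
    recommend_additional_pieces rich normal poor small
      = (pvLex.foldl (pvStep (pvQ rich normal poor small)) (none, none)).1 := by
  unfold recommend_additional_pieces pvLex
  simp only [List.foldl_flatMap, List.foldl_map]
  rfl

theorem pv_hw : ∀ t ∈ pvLex, 0 ≤ pvW t := by
  intro t ht
  simp only [pvLex, List.mem_flatMap, List.mem_map, PySem.List.mem_pyRange_one] at ht
  obtain ⟨r, ⟨hr0, _⟩, n, ⟨hn0, _⟩, p, ⟨hp0, _⟩, s, ⟨hs0, _⟩, rfl⟩ := ht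
  simp only [pvW]
  omega

theorem pv_B_eq (rich normal poor small : Int) :
    recommend_additional_pieces_alt rich normal poor small
      = pvR (pvQ rich normal poor small) pvLex := by
  unfold recommend_additional_pieces_alt pvR
  apply Eq.symm
  apply pv_findSome?_congr
  intro m hm
  obtain ⟨hm0, hm25⟩ := PySem.List.mem_pyRange_one.mp hm
  unfold pvSlot pvLex
  simp only [pv_find?_flatMap, List.find?_map]
  have key : ∀ r n p : Int, 0 ≤ r → 0 ≤ n → 0 ≤ p →
      ((PySem.List.pyRange 0 25 1).find?
          ((fun t => (pvW t == m) && pvQ rich normal poor small t) ∘ (fun s => (r, n, p, s))))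
        = if 0 ≤ m - r - n - p ∧ m - r - n - p < 25 ∧
              pvQ rich normal poor small (r, n, p, m - r - n - p) = true
          then some (m - r - n - p) else none := by
    intro r n p hr hn hp
    rw [pv_find?_congr _
        (fun s => (s == (m - r - n - p)) && pvQ rich normal poor small (r, n, p, s)) _ ?_]
    · rw [pv_find?_key _ _ _ (PySem.List.nodup_pyRange_one 0 25)]
      simp only [PySem.List.mem_pyRange_one]
      split_ifs with h1 h2 h2 <;> first | rfl | (exfalso; tauto)
    · intro s _
      have : (pvW (r, n, p, s) == m) = (s == (m - r - n - p)) := by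
        rw [Bool.eq_iff_iff]
        simp [pvW]
        omega
      simp [this]
  rw [pv_trunc _ (m + 1) 25 (by omega) (by omega) ?_]
  · apply pv_findSome?_congr
    intro r hr
    obtain ⟨hr0, hr1⟩ := PySem.List.mem_pyRange_one.mp hr
    rw [pv_trunc _ (m - r + 1) 25 (by omega) (by omega) ?_]
    · apply pv_findSome?_congr
      intro n hn
      obtain ⟨hn0, hn1⟩ := PySem.List.mem_pyRange_one.mp hn
      rw [pv_trunc _ (m - r - n + 1) 25 (by omega) (by omega) ?_]
      · apply pv_findSome?_congr
        intro p hp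
        obtain ⟨hp0, hp1⟩ := PySem.List.mem_pyRange_one.mp hp
        rw [key r n p (by omega) (by omega) (by omega)]
        by_cases hq : pvQ rich normal poor small (r, n, p, m - r - n - p) = true
        · rw [if_pos ⟨by omega, by omega, hq⟩]
          simp only [pvQ] at hq
          simp
          simp at hq
          tauto
        · rw [if_neg (by simp [hq])]
          have hq' : pvQ rich normal poor small (r, n, p, m - r - n - p) = false := by
            simpa using hq
          simp only [pvQ] at hq'
          simp
          simp at hq'
          tauto
      · intro p hpl hpu
        rw [key r n p (by omega) (by omega) (by omega)]
        have hno : ¬ (0 ≤ m - r - n - p ∧ m - r - n - p < 25 ∧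
            pvQ rich normal poor small (r, n, p, m - r - n - p) = true) :=
          fun h => absurd h.1 (by omega)
        rw [if_neg hno]
        rfl
    · intro n hnl hnu
      apply List.findSome?_eq_none_iff.mpr
      intro p hp
      obtain ⟨hp0, _⟩ := PySem.List.mem_pyRange_one.mp hp
      rw [key r n p (by omega) (by omega) (by omega)]
      have hno : ¬ (0 ≤ m - r - n - p ∧ m - r - n - p < 25 ∧
          pvQ rich normal poor small (r, n, p, m - r - n - p) = true) :=
        fun h => absurd h.1 (by omega)
      rw [if_neg hno]
      rfl
  · intro r hrl hru
    apply List.findSome?_eq_none_iff.mpr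
    intro n hn
    obtain ⟨hn0, _⟩ := PySem.List.mem_pyRange_one.mp hn
    apply List.findSome?_eq_none_iff.mpr
    intro p hp
    obtain ⟨hp0, _⟩ := PySem.List.mem_pyRange_one.mp hp
    rw [key r n p (by omega) (by omega) (by omega)]
    have hno : ¬ (0 ≤ m - r - n - p ∧ m - r - n - p < 25 ∧
        pvQ rich normal poor small (r, n, p, m - r - n - p) = true) :=
      fun h => absurd h.1 (by omega)
    rw [if_neg hno]
    rfl

-- ===== VERDICT (by name: the statement is the Claim_ definition above) =====
theorem recommend_additional_pieces_spec : Claim_equal_recommend_additional_pieces := by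
  intro rich normal poor small _
  unfold Spec_recommend_additional_pieces
  rw [pv_A_eq, pv_fold_eq_R (pvQ rich normal poor small) pvLex pv_hw, pv_B_eq]
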